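-- pv_equiv track=rewrite | github.com/x4dr/GamePack | gamepack/MDPack.py | search_tables
-- ===== SOURCE A (Python) =====
-- from typing import List, Dict, Tuple, Callable, Optional, Union, Any, Sequence
--
-- def search_tables(md: str, seek: str, surround: Optional[int] = None) -> str:
--     """
--     Search for a table row in Markdown text.
--
--     :param md: Markdown source.
--     :param seek: Term to search for.
--     :param surround: If set, returns a block of rows around the match.
--     :return: Matching table row or block.
--     """
--     found = False
--     curtable = []
--     end = -1
--
--     for line in md.splitlines(True):
--         if "|" in line:
--             curtable.append(line)
--             if not found and seek.lower() in line.lower():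
--                 if line.strip(" |").lower().startswith(seek.strip(" |").lower()):
--                     if surround is not None:
--                         end = surround * 2 + 1
--                         curtable = curtable[-surround - 1 :]
--                     found = True
--
--             if end != -1 and len(curtable) >= end:
--                 curtable = curtable[:end]
--                 break
--         else:
--             if found:
--                 break
--             else:
--                 curtable = []
--
--     if found:
--         return "".join(curtable)
--     else:
--         return ""
-- ===== SOURCE B (Python) =====
-- from typing import Optional
--
--
-- def search_tables(md: str, seek: str, surround: Optional[int] = None) -> str:
--     """Block-wise search: partition the text into maximal runs of '|'-lines,
--     find the first matching row, and slice its block directly."""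
--     lines = md.splitlines(True)
--     blocks = []
--     cur = []
--     for ln in lines:
--         if "|" in ln:
--             cur.append(ln)
--         elif cur:
--             blocks.append(cur)
--             cur = []
--     if cur:
--         blocks.append(cur)
--     sl = seek.lower()
--     sp = seek.strip(" |").lower()
--     for block in blocks:
--         for i, ln in enumerate(block):
--             if sl in ln.lower() and ln.strip(" |").lower().startswith(sp):
--                 if surround is None:
--                     return "".join(block)
--                 start = max(0, i - surround)
--                 return "".join(block[start:start + 2 * surround + 1])
--     return ""
-- ===== Notes on version B (the rewrite author's own statement) =====
-- stated objective: alternative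
-- what changed: B first partitions the text into maximal blocks of '|'-lines and then locates the first matching row and slices its block directly, instead of A's single streaming loop over lines with found/curtable/end state, in-flight negative-slice trimming and break-on-length truncation. Pre_ excludes a negative surround (a row count that is only meaningful when None or >= 0): on such inputs neither behaviour is specified and each implementation's value falls out of Python's negative-slice conventions, so the two need not agree (they agree only when no row matches).
-- outside the precondition, e.g. on search_tables('|a|\n|b|\n|c|\n', 'b', -1): A returns '|a|\n|b|\n|c|\n', B returns ''; on search_tables('|a|\n|b|\n|c|\n|d|\n|e|\n', 'a', -2): A returns '', B returns '|c|\n|d|\n'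
import Mathlib
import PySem

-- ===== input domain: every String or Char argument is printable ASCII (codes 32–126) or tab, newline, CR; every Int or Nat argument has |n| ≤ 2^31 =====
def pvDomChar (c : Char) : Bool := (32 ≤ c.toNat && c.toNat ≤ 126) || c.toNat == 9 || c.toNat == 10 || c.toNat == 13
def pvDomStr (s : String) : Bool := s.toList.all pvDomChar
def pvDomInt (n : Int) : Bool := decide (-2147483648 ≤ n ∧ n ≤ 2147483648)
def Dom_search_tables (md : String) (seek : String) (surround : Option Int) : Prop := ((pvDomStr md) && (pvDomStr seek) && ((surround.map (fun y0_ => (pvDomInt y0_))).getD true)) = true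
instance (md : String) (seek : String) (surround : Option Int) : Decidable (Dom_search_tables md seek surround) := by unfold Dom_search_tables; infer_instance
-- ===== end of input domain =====

-- B replaces A's streaming loop (found/curtable/end state with in-flight trimming) by a block
-- decomposition: partition the lines into maximal runs of '|'-lines, find the first matching
-- row, and slice its block directly (objective: alternative; same O(n) cost).

-- shared primitive, used by both ports: md.splitlines(True) (keepends). PySem.Str.splitlines
-- drops the line endings, so the keepends variant is ported by hand; it is exact on the input
-- domain (printable ASCII + tab/NL/CR), where the only line boundaries are '\n', '\r', '\r\n'.
def pySplitKeepAux : List Char → List Char → List (List Char)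
  | [], acc => if acc.isEmpty then [] else [acc]
  | c :: rest, acc =>
    if c = '\n' then (acc ++ [c]) :: pySplitKeepAux rest []
    else if c = '\r' then
      if rest.head? = some '\n' then (acc ++ [c, '\n']) :: pySplitKeepAux rest.tail []
      else (acc ++ [c]) :: pySplitKeepAux rest []
    else pySplitKeepAux rest (acc ++ [c])
termination_by cs _ => cs.length
decreasing_by all_goals simp [List.length_tail]

def pySplitlinesKeep (s : String) : List String :=
  (pySplitKeepAux s.toList []).map String.ofList

-- ===== PORT A =====
-- the for-loop of A, with its state (found, curtable, end); 'break'/loop-end return the state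
def loopA (seek : String) (surround : Option Int) :
    List String → Bool → List String → Int → Bool × List String
  | [], found, curtable, _ => (found, curtable)
  | line :: rest, found, curtable, end_ =>
    if PySem.Str.isIn "|" line then
      let ct1 := curtable ++ [line]
      let st :=
        if !found && PySem.Str.isIn (PySem.Str.lower seek) (PySem.Str.lower line) then
          if PySem.Str.startswith (PySem.Str.lower (PySem.Str.stripChars line " |"))
              (PySem.Str.lower (PySem.Str.stripChars seek " |")) then
            match surround with
            | some s => (true, PySem.List.slice ct1 (some (-s - 1)) none, s * 2 + 1)
            | none => (true, ct1, end_)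
          else (found, ct1, end_)
        else (found, ct1, end_)
      if st.2.2 ≠ -1 ∧ (st.2.1.length : Int) ≥ st.2.2 then
        (st.1, PySem.List.slice st.2.1 none (some st.2.2))
      else loopA seek surround rest st.1 st.2.1 st.2.2
    else
      if found then (found, curtable)
      else loopA seek surround rest found [] end_

def search_tables (md : String) (seek : String) (surround : Option Int) : String :=
  let r := loopA seek surround (pySplitlinesKeep md) false [] (-1)
  if r.1 then PySem.Str.join "" r.2 else ""

-- ===== PORT B =====
def matchRow (sl sp : String) (ln : String) : Bool :=
  PySem.Str.isIn sl (PySem.Str.lower ln) &&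
    PySem.Str.startswith (PySem.Str.lower (PySem.Str.stripChars ln " |")) sp

-- partition into maximal runs of consecutive lines containing '|'
def blocksAux : List String → List String → List (List String)
  | [], cur => if cur.isEmpty then [] else [cur]
  | ln :: rest, cur =>
    if PySem.Str.isIn "|" ln then blocksAux rest (cur ++ [ln])
    else if cur.isEmpty then blocksAux rest cur
    else cur :: blocksAux rest []

-- index of the first matching row of a block, if any (B's inner enumerate loop)
def firstMatch (sl sp : String) : List String → Option Nat
  | [] => none
  | ln :: rest => if matchRow sl sp ln then some 0 else (firstMatch sl sp rest).map (· + 1)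

def scanBlocks (sl sp : String) (surround : Option Int) : List (List String) → String
  | [] => ""
  | block :: rest =>
    match firstMatch sl sp block with
    | none => scanBlocks sl sp surround rest
    | some i =>
      match surround with
      | none => PySem.Str.join "" block
      | some s =>
        let start := max 0 ((i : Int) - s)
        PySem.Str.join "" (PySem.List.slice block (some start) (some (start + 2 * s + 1)))

def search_tables_alt (md : String) (seek : String) (surround : Option Int) : String :=
  let sl := PySem.Str.lower seek
  let sp := PySem.Str.lower (PySem.Str.stripChars seek " |")
  scanBlocks sl sp surround (blocksAux (pySplitlinesKeep md) [])

-- ===== PRECONDITION & SPEC =====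
-- Pre_ excludes a negative surround (a row count that is only meaningful when None or >= 0):
-- there neither behaviour is specified — each implementation's value falls out of Python's
-- negative-slice conventions, and the two need not agree (they agree only when no row matches).
def Pre_search_tables (md : String) (seek : String) (surround : Option Int) : Prop :=
  0 ≤ surround.getD 0
instance (md : String) (seek : String) (surround : Option Int) :
    Decidable (Pre_search_tables md seek surround) := by unfold Pre_search_tables; infer_instance

def pvWitness_search_tables : String × String × Option Int := ("|a|\n|b|\n", "a", some 1)

def Spec_search_tables (md : String) (seek : String) (surround : Option Int) (out : String) : Prop :=
  out = search_tables_alt md seek surround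
instance (md : String) (seek : String) (surround : Option Int) (out : String) :
    Decidable (Spec_search_tables md seek surround out) := by unfold Spec_search_tables; infer_instance

-- ===== CLAIM (what is proved, stated in full; the proofs are below) =====
def Claim_equal_search_tables : Prop := ∀ (md : String) (seek : String) (surround : Option Int), Dom_search_tables md seek surround → Pre_search_tables md seek surround → Spec_search_tables md seek surround (search_tables md seek surround)

-- ===== LEMMAS AND PROOFS =====

theorem loopA_found_none (seek : String) :
    ∀ (lines curtable : List String),
      loopA seek none lines true curtable (-1)
        = (true, curtable ++ lines.takeWhile (fun l => PySem.Str.isIn "|" l)) := by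
  intro lines
  induction lines with
  | nil => intro curtable; simp [loopA]
  | cons line rest ih =>
    intro curtable
    by_cases hp : PySem.Str.isIn "|" line = true <;>
      [skip; rw [Bool.not_eq_true] at hp] <;>
      simp only [PySem.Str.isIn_eq, show "|".toList = ['|'] from rfl] at hp <;>
      simp [loopA, hp, ih]

theorem loopA_found_some (seek : String) (s : Int) (hs : 0 ≤ s) :
    ∀ (lines curtable : List String), (curtable.length : Int) < s * 2 + 1 →
      loopA seek (some s) lines true curtable (s * 2 + 1)
        = (true, ((curtable ++ lines.takeWhile (fun l => PySem.Str.isIn "|" l)).take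
            (s * 2 + 1).toNat)) := by
  intro lines
  induction lines with
  | nil =>
    intro curtable hlen
    simp [loopA]
    omega
  | cons line rest ih =>
    intro curtable hlen
    by_cases hp : PySem.Str.isIn "|" line = true <;>
      [skip; rw [Bool.not_eq_true] at hp] <;>
      simp only [PySem.Str.isIn_eq, show "|".toList = ['|'] from rfl] at hp
    · by_cases hbig : (s * 2 : Int) ≤ curtable.length
      · have hlen1 : ((curtable ++ [line]).length : Int) = s * 2 + 1 := by
          simp; omega
        simp [loopA, hp, hbig, PySem.List.slice_to (curtable ++ [line])
          (by omega : (0:Int) ≤ s * 2 + 1), (show ¬(s * 2 + 1 = -1) by omega)]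
        conv_rhs => rw [List.append_cons]
        rw [List.take_left' (l₁ := curtable ++ [line]) (by have := hlen1; simp at this ⊢; omega)]
        exact List.take_of_length_le (by have := hlen1; simp at this ⊢; omega)
      · simp [loopA, hp, hbig, ih (curtable ++ [line]) (by simp; omega),
          (show ¬(s * 2 + 1 = -1) by omega)]
    · simp [loopA, hp]
      omega

theorem blocksAux_decomp :
    ∀ (lines cur : List String), cur ++ lines.takeWhile (fun l => PySem.Str.isIn "|" l) ≠ [] →
      blocksAux lines cur
        = (cur ++ lines.takeWhile (fun l => PySem.Str.isIn "|" l))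
            :: blocksAux (lines.dropWhile (fun l => PySem.Str.isIn "|" l)) [] := by
  intro lines
  induction lines with
  | nil =>
    intro cur hne
    simp at hne
    simp [blocksAux, hne]
  | cons line rest ih =>
    intro cur hne
    by_cases hp : PySem.Str.isIn "|" line = true <;>
      [skip; rw [Bool.not_eq_true] at hp] <;>
      simp only [PySem.Str.isIn_eq, show "|".toList = ['|'] from rfl] at hp
    · rw [List.takeWhile_cons, List.dropWhile_cons] at *
      simp [blocksAux, hp] at *
      rw [ih (cur ++ [line]) (by simp)]
      simp
    · simp only [List.takeWhile_cons] at hne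
      simp [hp] at hne
      simp [blocksAux, hp, hne]

theorem firstMatch_none (sl sp : String) :
    ∀ (block : List String), (∀ l ∈ block, matchRow sl sp l = false) →
      firstMatch sl sp block = none := by
  intro block
  induction block with
  | nil => intro _; rfl
  | cons ln rest ih =>
    intro h
    simp [firstMatch, h ln (by simp), ih (fun l hl => h l (by simp [hl]))]

theorem firstMatch_append (sl sp : String) :
    ∀ (cur : List String) (line : String) (t : List String),
      (∀ l ∈ cur, matchRow sl sp l = false) → matchRow sl sp line = true →
      firstMatch sl sp (cur ++ line :: t) = some cur.length := by
  intro cur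
  induction cur with
  | nil => intro line t _ hm; simp [firstMatch, hm]
  | cons c rest ih =>
    intro line t h hm
    simp [firstMatch, h c (by simp), ih line t (fun l hl => h l (by simp [hl])) hm]

theorem main_inv (seek : String) (surround : Option Int) (hs : 0 ≤ surround.getD 0) :
    ∀ (lines cur : List String),
      (∀ l ∈ cur, matchRow (PySem.Str.lower seek)
          (PySem.Str.lower (PySem.Str.stripChars seek " |")) l = false) →
      (if (loopA seek surround lines false cur (-1)).1 then
          PySem.Str.join "" (loopA seek surround lines false cur (-1)).2 else "")
        = scanBlocks (PySem.Str.lower seek) (PySem.Str.lower (PySem.Str.stripChars seek " |"))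
            surround (blocksAux lines cur) := by
  intro lines
  induction lines with
  | nil =>
    intro cur h
    by_cases hc : cur = []
    · subst hc; simp [loopA, blocksAux, scanBlocks]
    · simp only [loopA]
      have : blocksAux [] cur = [cur] := by simp [blocksAux, hc]
      rw [this]
      simp only [scanBlocks, firstMatch_none _ _ cur h]
      simp
  | cons line rest ih =>
    intro cur h
    by_cases hp : PySem.Str.isIn "|" line = true
    · -- pipe line
      have hmr : matchRow (PySem.Str.lower seek)
            (PySem.Str.lower (PySem.Str.stripChars seek " |")) line
          = (PySem.Str.isIn (PySem.Str.lower seek) (PySem.Str.lower line) &&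
              PySem.Str.startswith (PySem.Str.lower (PySem.Str.stripChars line " |"))
                (PySem.Str.lower (PySem.Str.stripChars seek " |"))) := rfl
      have hblocks : blocksAux (line :: rest) cur = blocksAux rest (cur ++ [line]) := by
        simp only [blocksAux]; rw [if_pos hp]
      by_cases hm : matchRow (PySem.Str.lower seek)
          (PySem.Str.lower (PySem.Str.stripChars seek " |")) line = true
      · -- pipe line with the first match: A fills its window, B slices the block
        have hm' := hm
        rw [hmr, Bool.and_eq_true] at hm'
        obtain ⟨hc1, hc2⟩ := hm'
        have hdec := blocksAux_decomp rest (cur ++ [line]) (by simp)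
        have hassoc : (cur ++ [line]) ++ List.takeWhile (fun l => PySem.Str.isIn "|" l) rest
            = cur ++ line :: List.takeWhile (fun l => PySem.Str.isIn "|" l) rest := by simp
        have hfm := firstMatch_append (PySem.Str.lower seek)
          (PySem.Str.lower (PySem.Str.stripChars seek " |")) cur line
          (List.takeWhile (fun l => PySem.Str.isIn "|" l) rest) h hm
        cases surround with
        | none =>
          have hstepN : loopA seek none (line :: rest) false cur (-1)
              = (true, (cur ++ [line]) ++ List.takeWhile (fun l => PySem.Str.isIn "|" l) rest) := by
            simp only [loopA]; rw [if_pos hp]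
            simp only [Bool.not_false, Bool.true_and]
            rw [if_pos hc1, if_pos hc2]
            simp [loopA_found_none seek rest (cur ++ [line])]
          rw [hstepN, hblocks, hdec]
          simp only [scanBlocks, hassoc, hfm]
          simp
        | some s =>
          have hs' : (0:Int) ≤ s := by simpa using hs
          have hkeq : (-s - 1) = -((s.toNat + 1 : Nat) : Int) := by push_cast; omega
          have hdrop : PySem.List.slice (cur ++ [line]) (some (-s - 1)) none
              = (cur ++ [line]).drop ((cur ++ [line]).length - (s.toNat + 1)) := by
            rw [hkeq, PySem.List.slice_from_neg_natCast (cur ++ [line]) (s.toNat + 1) (by omega)]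
          have hl2 : ((cur ++ [line]).drop ((cur ++ [line]).length - (s.toNat + 1))).length
              = (cur ++ [line]).length - ((cur ++ [line]).length - (s.toNat + 1)) := by
            rw [List.length_drop]
          have hstepS : loopA seek (some s) (line :: rest) false cur (-1)
              = (true, (((cur ++ [line]).drop ((cur ++ [line]).length - (s.toNat + 1))
                  ++ List.takeWhile (fun l => PySem.Str.isIn "|" l) rest).take
                    (s * 2 + 1).toNat)) := by
            simp only [loopA]; rw [if_pos hp]
            simp only [Bool.not_false, Bool.true_and]
            rw [if_pos hc1, if_pos hc2]
            simp only [hdrop]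
            by_cases hbig : ((((cur ++ [line]).drop ((cur ++ [line]).length - (s.toNat + 1))).length : Int) ≥ s * 2 + 1)
            · have hlen2 : ((cur ++ [line]).drop ((cur ++ [line]).length - (s.toNat + 1))).length
                  = (s * 2 + 1).toNat := by
                rw [hl2]; simp only [List.length_append, List.length_singleton]; omega
              rw [if_pos ⟨by omega, hbig⟩, PySem.List.slice_to _ (by omega : (0:Int) ≤ s * 2 + 1)]
              rw [List.take_left' hlen2, List.take_of_length_le (le_of_eq hlen2)]
            · rw [if_neg (by rintro ⟨-, hgt⟩; exact hbig hgt)]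
              exact loopA_found_some seek s hs' rest _ (by omega)
          rw [hstepS, hblocks, hdec]
          simp only [scanBlocks, hassoc, hfm]
          have hstart : (0:Int) ≤ max 0 ((cur.length : Int) - s) := by omega
          rw [PySem.List.slice_toNat _ hstart (by omega)]
          have hnn : (max 0 ((cur.length : Int) - s) + 2 * s + 1).toNat
              - (max 0 ((cur.length : Int) - s)).toNat = (s * 2 + 1).toNat := by omega
          have hidx : (max 0 ((cur.length : Int) - s)).toNat
              = (cur ++ [line]).length - (s.toNat + 1) := by
            simp only [List.length_append, List.length_singleton]; omega
          rw [hnn, hidx, ← hassoc,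
            List.drop_append_of_le_length (by simp only [List.length_append, List.length_singleton]; omega)]
          simp
          rw [List.drop_append_of_le_length (l₁ := cur) (by omega)]
      · -- pipe line, no match: both sides extend the current block
        rw [Bool.not_eq_true, hmr, Bool.and_eq_false_iff] at hm
        have hstep : loopA seek surround (line :: rest) false cur (-1)
            = loopA seek surround rest false (cur ++ [line]) (-1) := by
          simp only [loopA]; rw [if_pos hp]
          simp only [Bool.not_false, Bool.true_and]
          rcases hm with hc1 | hc2
          · rw [if_neg (c := PySem.Str.isIn (PySem.Str.lower seek) (PySem.Str.lower line) = true) (by rw [hc1]; simp)]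
            simp
          · by_cases hc1 : PySem.Str.isIn (PySem.Str.lower seek) (PySem.Str.lower line) = true
            · rw [if_pos hc1, if_neg (c := PySem.Str.startswith (PySem.Str.lower (PySem.Str.stripChars line " |")) (PySem.Str.lower (PySem.Str.stripChars seek " |")) = true) (by rw [hc2]; simp)]
              simp
            · rw [if_neg hc1]; simp
        have hext : ∀ l ∈ cur ++ [line], matchRow (PySem.Str.lower seek)
            (PySem.Str.lower (PySem.Str.stripChars seek " |")) l = false := by
          intro l hl
          rcases List.mem_append.mp hl with h1 | h1
          · exact h l h1
          · simp at h1; subst h1; rw [hmr, Bool.and_eq_false_iff]; exact hm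
        rw [hstep, ih (cur ++ [line]) hext, hblocks]
    · -- non-pipe line: A resets curtable, B flushes the (matchless) block
      have hstep : loopA seek surround (line :: rest) false cur (-1)
          = loopA seek surround rest false [] (-1) := by
        simp only [loopA]; rw [if_neg hp]; simp
      have hblocks : blocksAux (line :: rest) cur
          = if cur.isEmpty then blocksAux rest [] else cur :: blocksAux rest [] := by
        simp only [blocksAux]; rw [if_neg hp]; by_cases hc : cur = [] <;> simp [hc]
      rw [hstep, ih [] (by simp), hblocks]
      by_cases hc : cur = []
      · simp [hc]
      · simp [hc, scanBlocks, firstMatch_none _ _ cur h]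

-- ===== VERDICT (by name: the statement is the Claim_ definition above) =====
theorem search_tables_spec : Claim_equal_search_tables := by
  unfold Claim_equal_search_tables
  intro md seek surround _ hpre
  unfold Spec_search_tables search_tables search_tables_alt
  exact main_inv seek surround hpre (pySplitlinesKeep md) [] (by simp)
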